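-- pv_equiv track=rewrite | github.com/pypi-data/pypi-mirror-290 | packages/benvy/benvy-1.4.8-py3-none-any.whl/benvy/databricks/repos/pylint/PylintResultsEnhancer.py | _get_cell_line_number
-- ===== SOURCE A (Python) =====
-- def _get_cell_line_number(notebook_source: str, line_number: int) -> int:
--     cell_line_number = 0
--
--     for index, line in enumerate(notebook_source.split("\n"), 1):
--         if line == "# COMMAND ----------":
--             cell_line_number = 0
--             continue
--
--         if index == line_number:
--             return cell_line_number
--
--         cell_line_number += 1
--
--     raise Exception(f"Line with number {line_number} not found in source")
-- ===== SOURCE B (Python) =====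
-- def _get_cell_line_number(notebook_source: str, line_number: int) -> int:
--     lines = notebook_source.split("\n")
--     idx = line_number - 1
--     if idx < 0 or idx >= len(lines) or lines[idx] == "# COMMAND ----------":
--         raise Exception(f"Line with number {line_number} not found in source")
--     j = idx - 1
--     while j >= 0 and lines[j] != "# COMMAND ----------":
--         j -= 1
--     return idx - j - 1
-- ===== Notes on version B (the rewrite author's own statement) =====
-- stated objective: alternative
-- what changed: Replaces A's forward enumerate-and-count loop (resetting a counter at each cell marker) by index validation plus a single backward scan from the target line to the nearest preceding marker, returning idx - j - 1.
import Mathlib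
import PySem

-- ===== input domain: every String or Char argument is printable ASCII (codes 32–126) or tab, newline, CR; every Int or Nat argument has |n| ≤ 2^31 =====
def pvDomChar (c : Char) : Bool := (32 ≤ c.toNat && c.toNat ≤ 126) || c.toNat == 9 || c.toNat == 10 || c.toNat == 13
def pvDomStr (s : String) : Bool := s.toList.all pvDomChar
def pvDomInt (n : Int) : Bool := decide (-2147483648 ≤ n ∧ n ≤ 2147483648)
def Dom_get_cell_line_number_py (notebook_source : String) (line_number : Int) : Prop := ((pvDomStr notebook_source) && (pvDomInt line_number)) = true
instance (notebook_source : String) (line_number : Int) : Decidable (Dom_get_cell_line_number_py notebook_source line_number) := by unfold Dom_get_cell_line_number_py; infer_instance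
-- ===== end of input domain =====

-- B replaces A's forward enumerate-and-count loop by index validation plus a backward
-- scan to the nearest preceding cell marker (alternative decomposition; return value only,
-- inputs on which A raises are excluded by Pre_).

-- ===== PORT A =====
-- the loop body of A: state = (1-based index, cell_line_number); none = falls off the end (A raises)
def pvLoopA (target : Int) : List String → Int → Int → Option Int
  | [], _, _ => none
  | l :: ls, index, cell =>
    if l = "# COMMAND ----------" then pvLoopA target ls (index + 1) 0
    else if index = target then some cell
    else pvLoopA target ls (index + 1) (cell + 1)

def get_cell_line_number_py (notebook_source : String) (line_number : Int) : Int :=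
  (pvLoopA line_number ((PySem.Str.split? notebook_source "\n").getD []) 1 0).getD 0

-- ===== PORT B =====
-- B's while loop: pvBackJ lines n = final j after scanning positions n-1, n-2, … for the marker (-1 if none)
def pvBackJ (lines : List String) : Nat → Int
  | 0 => -1
  | k + 1 => if lines.getD k "" = "# COMMAND ----------" then (k : Int) else pvBackJ lines k

def get_cell_line_number_py_alt (notebook_source : String) (line_number : Int) : Int :=
  let lines := (PySem.Str.split? notebook_source "\n").getD []
  let idx := line_number - 1
  if idx < 0 ∨ (lines.length : Int) ≤ idx ∨ lines.getD idx.toNat "" = "# COMMAND ----------" then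
    0  -- A and B raise here; excluded by Pre_
  else
    idx - pvBackJ lines idx.toNat - 1

-- ===== PRECONDITION & SPEC =====
-- Pre_ = exactly the inputs where Python A returns (both raise otherwise): line_number is a
-- valid 1-based line index and the target line is not the cell marker.
def Pre_get_cell_line_number_py (notebook_source : String) (line_number : Int) : Prop :=
  let lines := (PySem.Str.split? notebook_source "\n").getD []
  1 ≤ line_number ∧ line_number ≤ (lines.length : Int) ∧
    lines.getD (line_number - 1).toNat "" ≠ "# COMMAND ----------"
instance (notebook_source : String) (line_number : Int) : Decidable (Pre_get_cell_line_number_py notebook_source line_number) := by unfold Pre_get_cell_line_number_py; infer_instance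

def pvWitness_get_cell_line_number_py : String × Int := ("a\n# COMMAND ----------\nb\nc", 4)

def Spec_get_cell_line_number_py (notebook_source : String) (line_number : Int) (out : Int) : Prop := out = get_cell_line_number_py_alt notebook_source line_number
instance (notebook_source : String) (line_number : Int) (out : Int) : Decidable (Spec_get_cell_line_number_py notebook_source line_number out) := by unfold Spec_get_cell_line_number_py; infer_instance

-- ===== CLAIM (what is proved, stated in full; the proofs are below) =====
def Claim_equal_get_cell_line_number_py : Prop := ∀ (notebook_source : String) (line_number : Int), Dom_get_cell_line_number_py notebook_source line_number → Pre_get_cell_line_number_py notebook_source line_number → Spec_get_cell_line_number_py notebook_source line_number (get_cell_line_number_py notebook_source line_number)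

-- ===== LEMMAS AND PROOFS =====

lemma pvBackJ_cases (ls : List String) : ∀ n : Nat, 0 ≤ pvBackJ ls n ∨ pvBackJ ls n = -1 := by
  intro n
  induction n with
  | zero => right; rfl
  | succ k ihk =>
    rw [show pvBackJ ls (k + 1) =
        (if ls.getD k "" = "# COMMAND ----------" then (k : Int) else pvBackJ ls k) from rfl]
    by_cases h : ls.getD k "" = "# COMMAND ----------"
    · left; rw [if_pos h]; positivity
    · rw [if_neg h]; exact ihk

lemma pvBackJ_cons (l : String) (ls : List String) : ∀ n : Nat,
    pvBackJ (l :: ls) (n + 1) =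
      if pvBackJ ls n = -1 then (if l = "# COMMAND ----------" then 0 else -1)
      else pvBackJ ls n + 1 := by
  intro n
  induction n with
  | zero => simp [pvBackJ]
  | succ k ih =>
    rw [show pvBackJ (l :: ls) (k + 1 + 1) =
          (if (l :: ls).getD (k + 1) "" = "# COMMAND ----------" then ((k + 1 : Nat) : Int)
           else pvBackJ (l :: ls) (k + 1)) from rfl,
        show pvBackJ ls (k + 1) =
          (if ls.getD k "" = "# COMMAND ----------" then (k : Int) else pvBackJ ls k) from rfl,
        List.getD_cons_succ]
    by_cases h : ls.getD k "" = "# COMMAND ----------"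
    · rw [if_pos h, if_pos h, if_neg (by omega)]; push_cast; ring
    · rw [if_neg h, if_neg h, ih]

lemma pvLoopA_closed (ls : List String) : ∀ (i c t : Int),
    pvLoopA t ls i c =
      if 0 ≤ t - i ∧ t - i < (ls.length : Int) ∧ ls.getD (t - i).toNat "" ≠ "# COMMAND ----------" then
        some (if pvBackJ ls (t - i).toNat = -1 then (t - i) + c
              else (t - i) - pvBackJ ls (t - i).toNat - 1)
      else none := by
  induction ls with
  | nil =>
    intro i c t
    rw [if_neg (by rintro ⟨h1, h2, _⟩; simp at h2; omega)]
    rfl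
  | cons l ls ih =>
    intro i c t
    have hlen : ((l :: ls).length : Int) = (ls.length : Int) + 1 := by simp
    by_cases hb : 0 ≤ t - i ∧ t - i < ((l :: ls).length : Int)
    · obtain ⟨hp0, hplt⟩ := hb
      by_cases hp : t - i = 0
      · -- target is the head line
        have hi : i = t := by omega
        have hget : (l :: ls).getD (t - i).toNat "" = l := by rw [hp]; rfl
        have hbj : pvBackJ (l :: ls) (t - i).toNat = -1 := by rw [hp]; rfl
        by_cases hl : l = "# COMMAND ----------"
        · have hA : pvLoopA t (l :: ls) i c = pvLoopA t ls (i + 1) 0 := by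
            simp [pvLoopA, hl]
          rw [hA, ih,
            if_neg (show ¬ (0 ≤ t - (i + 1) ∧ t - (i + 1) < (ls.length : Int) ∧
              ls.getD (t - (i + 1)).toNat "" ≠ "# COMMAND ----------") from by
                rintro ⟨hx, _, _⟩; omega),
            if_neg (show ¬ (0 ≤ t - i ∧ t - i < ((l :: ls).length : Int) ∧
              (l :: ls).getD (t - i).toNat "" ≠ "# COMMAND ----------") from by
                rintro ⟨_, _, hne⟩; exact hne (by rw [hget]; exact hl))]
        · have hA : pvLoopA t (l :: ls) i c = some c := by
            simp [pvLoopA, hl, hi]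
          rw [hA,
            if_pos (show 0 ≤ t - i ∧ t - i < ((l :: ls).length : Int) ∧
              (l :: ls).getD (t - i).toNat "" ≠ "# COMMAND ----------" from
                ⟨hp0, hplt, by rw [hget]; exact hl⟩),
            hbj, if_pos rfl, hp]
          norm_num
      · -- target strictly inside ls
        have hptn : (t - i).toNat = (t - (i + 1)).toNat + 1 := by omega
        have hget : (l :: ls).getD (t - i).toNat "" = ls.getD (t - (i + 1)).toNat "" := by
          rw [hptn]; simp
        have hbj := pvBackJ_cons l ls (t - (i + 1)).toNat
        rw [← hptn] at hbj
        have hA : pvLoopA t (l :: ls) i c =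
            pvLoopA t ls (i + 1) (if l = "# COMMAND ----------" then 0 else c + 1) := by
          by_cases hl : l = "# COMMAND ----------"
          · simp [pvLoopA, hl]
          · simp [pvLoopA, hl, show ¬ i = t by omega]
        by_cases hc : 0 ≤ t - (i + 1) ∧ t - (i + 1) < (ls.length : Int) ∧
            ls.getD (t - (i + 1)).toNat "" ≠ "# COMMAND ----------"
        · rw [hA, ih, if_pos hc,
            if_pos (show 0 ≤ t - i ∧ t - i < ((l :: ls).length : Int) ∧
              (l :: ls).getD (t - i).toNat "" ≠ "# COMMAND ----------" from
                ⟨hp0, hplt, by rw [hget]; exact hc.2.2⟩)]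
          rcases pvBackJ_cases ls (t - (i + 1)).toNat with h0 | h0
          · have hbj' : pvBackJ (l :: ls) (t - i).toNat = pvBackJ ls (t - (i + 1)).toNat + 1 := by
              rw [hbj, if_neg (by omega)]
            rw [if_neg (show ¬ pvBackJ ls (t - (i + 1)).toNat = -1 by omega), hbj',
              if_neg (show ¬ pvBackJ ls (t - (i + 1)).toNat + 1 = -1 by omega)]
            congr 1; ring
          · by_cases hl : l = "# COMMAND ----------"
            · have hbj' : pvBackJ (l :: ls) (t - i).toNat = 0 := by
                rw [hbj, h0, if_pos rfl, if_pos hl]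
              rw [if_pos hl, if_pos h0, hbj', if_neg (show ¬ (0 : Int) = -1 by omega)]
              congr 1; omega
            · have hbj' : pvBackJ (l :: ls) (t - i).toNat = -1 := by
                rw [hbj, h0, if_pos rfl, if_neg hl]
              rw [if_neg hl, if_pos h0, hbj', if_pos rfl]
              congr 1; omega
        · rw [hA, ih, if_neg hc,
            if_neg (show ¬ (0 ≤ t - i ∧ t - i < ((l :: ls).length : Int) ∧
              (l :: ls).getD (t - i).toNat "" ≠ "# COMMAND ----------") from by
                rintro ⟨_, _, hne⟩
                exact hc ⟨by omega, by omega, by rw [← hget]; exact hne⟩)]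
    · -- out of range: both sides none
      have hA : pvLoopA t (l :: ls) i c =
          pvLoopA t ls (i + 1) (if l = "# COMMAND ----------" then 0 else c + 1) := by
        by_cases hl : l = "# COMMAND ----------"
        · simp [pvLoopA, hl]
        · have hi : ¬ i = t := by rintro rfl; exact hb ⟨by omega, by rw [hlen]; omega⟩
          simp [pvLoopA, hl, hi]
      rw [hA, ih,
        if_neg (show ¬ (0 ≤ t - (i + 1) ∧ t - (i + 1) < (ls.length : Int) ∧
          ls.getD (t - (i + 1)).toNat "" ≠ "# COMMAND ----------") from by
            rintro ⟨h1, h2, _⟩; exact hb ⟨by omega, by rw [hlen]; omega⟩),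
        if_neg (show ¬ (0 ≤ t - i ∧ t - i < ((l :: ls).length : Int) ∧
          (l :: ls).getD (t - i).toNat "" ≠ "# COMMAND ----------") from by
            rintro ⟨h1, h2, _⟩; exact hb ⟨h1, h2⟩)]

-- ===== VERDICT (by name: the statement is the Claim_ definition above) =====
theorem get_cell_line_number_py_spec : Claim_equal_get_cell_line_number_py := by
  intro notebook_source line_number _ hpre
  unfold Pre_get_cell_line_number_py at hpre
  obtain ⟨h1, h2, h3⟩ := hpre
  unfold Spec_get_cell_line_number_py get_cell_line_number_py get_cell_line_number_py_alt
  rw [pvLoopA_closed]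
  rw [if_pos (show 0 ≤ line_number - 1 ∧
      line_number - 1 < ((((PySem.Str.split? notebook_source "\n").getD []).length : Nat) : Int) ∧
      ((PySem.Str.split? notebook_source "\n").getD []).getD (line_number - 1).toNat "" ≠
        "# COMMAND ----------" from ⟨by omega, by omega, h3⟩)]
  rw [if_neg (show ¬ (line_number - 1 < 0 ∨
      ((((PySem.Str.split? notebook_source "\n").getD []).length : Nat) : Int) ≤ line_number - 1 ∨
      ((PySem.Str.split? notebook_source "\n").getD []).getD (line_number - 1).toNat "" =
        "# COMMAND ----------") from by
    rintro (h | h | h)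
    · omega
    · omega
    · exact h3 h)]
  simp only [Option.getD_some]
  by_cases hb : pvBackJ ((PySem.Str.split? notebook_source "\n").getD []) (line_number - 1).toNat = -1
  · rw [if_pos hb, hb]; ring
  · rw [if_neg hb]
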